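-- pv_equiv track=rewrite | github.com/asnakeassefa/A2SV_programming | AfricanCrossword.py | encrypted
-- ===== SOURCE A (Python) =====
-- from collections import defaultdict
--
-- def encrypted(grid):
-- 	row = len(grid)
-- 	col = len(grid[0])
-- 	newWord = []
-- 	ans = ""
-- 	#remove duplicate elements the row
-- 	for rowidx in range(row):
-- 		temp = []
-- 		for colidx in range(col):
-- 			if grid[rowidx].count(grid[rowidx][colidx]) > 1:
-- 				temp.append("_")
-- 			else:
-- 				temp.append(grid[rowidx][colidx])
-- 		newWord.append(temp)
--
-- 	# removes duplicate elements in col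
-- 	for colidx in range(col):
-- 		temp = ""
-- 		colCount = defaultdict(int)
-- 		for rowidx in range(row):
-- 			colCount[grid[rowidx][colidx]] += 1
-- 		# remove duplicate elements in col
-- 		temp = ""
-- 		for rowidx in range(row):
-- 			if colCount[grid[rowidx][colidx]] > 1:
-- 				newWord[rowidx][colidx] = "_"
--
-- 	#build the answer
-- 	ans = ""
-- 	for row in range(len(newWord)):
-- 		for col in range(len(newWord[0])):
-- 			if newWord[row][col] != "_":
-- 				ans += newWord[row][col]
-- 	return ans
-- ===== SOURCE B (Python) =====
-- from collections import Counter
--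
-- def encrypted(grid):
--     rows = len(grid)
--     cols = len(grid[0])
--     colCounts = [Counter(grid[r][c] for r in range(rows)) for c in range(cols)]
--     out = []
--     for r in range(rows):
--         rowCount = Counter(grid[r])
--         for c in range(cols):
--             ch = grid[r][c]
--             if rowCount[ch] == 1 and colCounts[c][ch] == 1:
--                 out.append(ch)
--     return "".join(out)
-- ===== Notes on version B (the rewrite author's own statement) =====
-- stated objective: faster
-- what changed: B drops A's three-phase pipeline (build a blanked copy of the grid with '_' sentinels, mutate it column-wise in place, then rescan it) and instead builds per-row and per-column Counters over the original grid and collects surviving cells in one fused row-major pass with no intermediate 2D grid.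
-- intended difference: On grids containing a cell equal to the literal string '_' that is unique in its row and in its column, A drops that cell (it collides with A's own blanking sentinel '_') while B keeps it; keeping it is intended since the rule is 'keep cells unique in both row and column'. — e.g. on encrypted([["_", "b"], ["c", "d"]]): A returns "bcd", B returns "_bcd"
import Mathlib
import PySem

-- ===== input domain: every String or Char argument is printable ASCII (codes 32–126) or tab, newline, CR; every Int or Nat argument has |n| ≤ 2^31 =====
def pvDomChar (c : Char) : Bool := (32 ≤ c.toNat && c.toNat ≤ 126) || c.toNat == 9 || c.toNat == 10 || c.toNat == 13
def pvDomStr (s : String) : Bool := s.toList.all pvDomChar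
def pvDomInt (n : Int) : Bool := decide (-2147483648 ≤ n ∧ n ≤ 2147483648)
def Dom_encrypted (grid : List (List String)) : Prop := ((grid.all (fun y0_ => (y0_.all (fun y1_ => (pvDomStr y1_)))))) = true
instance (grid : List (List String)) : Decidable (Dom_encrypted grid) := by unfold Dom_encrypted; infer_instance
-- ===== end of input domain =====

-- B replaces A's blank-out-then-rescan pipeline (a mutated 2D sentinel grid plus a rebuild pass)
-- by per-row/per-column Counters and one fused collection pass (faster: no per-cell list.count);
-- B also fixes A's sentinel clash (a cell equal to the string "_" that is unique in its row and
-- column is wrongly dropped by A) — see D_encrypted.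

-- ===== PORT A =====
def encrypted (grid : List (List String)) : String :=
  let row := grid.length
  let col := (grid.headD []).length
  -- remove duplicate elements in the row
  let newWord : List (List String) :=
    (List.range row).foldl (fun nw rowidx =>
      let temp := (List.range col).foldl (fun temp colidx =>
        if (grid.getD rowidx []).count ((grid.getD rowidx []).getD colidx "") > 1
        then temp ++ ["_"]
        else temp ++ [(grid.getD rowidx []).getD colidx ""]) []
      nw ++ [temp]) []
  -- removes duplicate elements in col (in-place mutation of newWord, ported as a fold)
  let newWord2 : List (List String) :=
    (List.range col).foldl (fun nw colidx =>
      let colCount := (List.range row).foldl (fun d rowidx =>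
          d.modify ((grid.getD rowidx []).getD colidx "") 0 (· + 1))
          (PySem.Dict.empty : PySem.Dict String Int)
      (List.range row).foldl (fun nw rowidx =>
        if colCount.getD ((grid.getD rowidx []).getD colidx "") 0 > 1
        then nw.set rowidx ((nw.getD rowidx []).set colidx "_")
        else nw) nw) newWord
  -- build the answer (ans += cell, ported as a character-list accumulator)
  let ans : List Char :=
    (List.range newWord2.length).foldl (fun acc r =>
      (List.range (newWord2.headD []).length).foldl (fun acc c =>
        if (newWord2.getD r []).getD c "" ≠ "_"
        then acc ++ ((newWord2.getD r []).getD c "").toList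
        else acc) acc) []
  String.mk ans

-- ===== PORT B =====
def encrypted_alt (grid : List (List String)) : String :=
  let rows := grid.length
  let cols := (grid.headD []).length
  let colCounts : List (PySem.Dict String Int) :=
    (List.range cols).map (fun c =>
      PySem.Dict.counter ((List.range rows).map (fun r => (grid.getD r []).getD c "")))
  let out : List String :=
    (List.range rows).foldl (fun out r =>
      let rowCount := PySem.Dict.counter (grid.getD r [])
      (List.range cols).foldl (fun out c =>
        let ch := (grid.getD r []).getD c ""
        if rowCount.getD ch 0 == 1 && (colCounts.getD c PySem.Dict.empty).getD ch 0 == 1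
        then out ++ [ch]
        else out) out) []
  String.mk (PySem.Chars.join [] (out.map String.toList))

-- ===== PRECONDITION & SPEC =====
-- Pre_ excludes exactly the inputs where A raises IndexError: the empty grid (grid[0]),
-- and ragged grids with some row shorter than the first row (grid[r][c] with c < len(grid[0])).
def Pre_encrypted (grid : List (List String)) : Prop :=
  grid ≠ [] ∧ ∀ l ∈ grid, (grid.headD []).length ≤ l.length
instance (grid : List (List String)) : Decidable (Pre_encrypted grid) := by
  unfold Pre_encrypted; infer_instance
def pvWitness_encrypted : List (List String) := [["a", "b"], ["c", "a"]]

-- On grids containing a cell that is the literal string "_" and is unique in its row and its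
-- column, A drops that cell (the "_" collides with A's own blanking sentinel) while B keeps it,
-- which is the intended value since the cell is unique in both row and column.
def D_encrypted (grid : List (List String)) : Prop :=
  ∃ r ∈ List.range grid.length, ∃ c ∈ List.range (grid.headD []).length,
    (grid.getD r []).getD c "" = "_" ∧
    (grid.getD r []).count "_" = 1 ∧
    ((List.range grid.length).map (fun r' => (grid.getD r' []).getD c "")).count "_" = 1
instance (grid : List (List String)) : Decidable (D_encrypted grid) := by
  unfold D_encrypted; infer_instance

def Spec_encrypted (grid : List (List String)) (out : String) : Prop :=
  ¬ D_encrypted grid → out = encrypted_alt grid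
instance (grid : List (List String)) (out : String) : Decidable (Spec_encrypted grid out) := by
  unfold Spec_encrypted; infer_instance

def pvDiffWitness_encrypted : List (List String) := [["_", "b"], ["c", "d"]]
def pvDiffWitnessOut_encrypted : String × String := ("bcd", "_bcd")

-- ===== CLAIM (what is proved, stated in full; the proofs are below) =====
def Claim_unchanged_encrypted : Prop :=
  ∀ (grid : List (List String)), Dom_encrypted grid → Pre_encrypted grid →
    Spec_encrypted grid (encrypted grid)
def Claim_changed_encrypted : Prop :=
  Dom_encrypted (pvDiffWitness_encrypted) ∧ Pre_encrypted (pvDiffWitness_encrypted) ∧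
  D_encrypted (pvDiffWitness_encrypted) ∧
  encrypted (pvDiffWitness_encrypted) = pvDiffWitnessOut_encrypted.1 ∧
  encrypted_alt (pvDiffWitness_encrypted) = pvDiffWitnessOut_encrypted.2 ∧
  pvDiffWitnessOut_encrypted.1 ≠ pvDiffWitnessOut_encrypted.2

-- ===== LEMMAS AND PROOFS =====

theorem pv_getD_set {α : Type} (l : List α) (i j : Nat) (a d : α) :
    (l.set i a).getD j d = if i = j ∧ i < l.length then a else l.getD j d := by
  simp only [List.getD_eq_getElem?_getD, List.getElem?_set]
  by_cases h : i = j
  · subst h; by_cases hl : i < l.length <;> simp [hl]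
  · simp [h]

theorem pv_inner (P : Nat → Prop) [DecidablePred P] (c : Nat) (rs : List Nat)
    (nw : List (List String)) :
    (rs.foldl (fun nw r => if P r then nw.set r ((nw.getD r []).set c "_") else nw) nw).length
        = nw.length ∧
    ∀ r', (rs.foldl (fun nw r => if P r then nw.set r ((nw.getD r []).set c "_") else nw) nw).getD r' []
        = if r' ∈ rs ∧ P r' ∧ r' < nw.length then (nw.getD r' []).set c "_" else nw.getD r' [] := by
  induction rs generalizing nw with
  | nil => simp
  | cons r rest ih =>
    simp only [List.foldl_cons]
    obtain ⟨ihl, ihe⟩ := ih (if P r then nw.set r ((nw.getD r []).set c "_") else nw)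
    refine ⟨by rw [ihl]; split <;> simp, ?_⟩
    intro r'
    rw [ihe r']
    by_cases hP : P r
    · simp only [hP, if_true, List.length_set]
      rw [pv_getD_set]
      by_cases hr : r = r' <;> by_cases hP' : P r' <;> by_cases hlt : r' < nw.length <;>
        by_cases hm : r' ∈ rest <;>
        simp_all [List.set_set, List.mem_cons]
      all_goals (intro h; exact absurd h.symm hr)
    · simp only [hP, if_false]
      by_cases hr : r' = r <;> simp_all [List.mem_cons]


theorem pv_inner_entry (P : Nat → Prop) [DecidablePred P] (c : Nat) (rs : List Nat)
    (nw : List (List String)) (r' c' : Nat) :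
    ((rs.foldl (fun nw r => if P r then nw.set r ((nw.getD r []).set c "_") else nw) nw).getD r' []).getD c' ""
      = if r' ∈ rs ∧ P r' ∧ r' < nw.length ∧ c = c' ∧ c < (nw.getD r' []).length then "_"
        else (nw.getD r' []).getD c' "" := by
  rw [(pv_inner P c rs nw).2 r']
  by_cases h : r' ∈ rs ∧ P r' ∧ r' < nw.length
  · rw [if_pos h, pv_getD_set]
    by_cases hc : c = c' ∧ c < (nw.getD r' []).length
    · rw [if_pos hc, if_pos ⟨h.1, h.2.1, h.2.2, hc.1, hc.2⟩]
    · rw [if_neg hc, if_neg (by tauto)]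
  · rw [if_neg h, if_neg (by tauto)]

theorem pv_inner_rowlen (P : Nat → Prop) [DecidablePred P] (c : Nat) (rs : List Nat)
    (nw : List (List String)) (r' : Nat) :
    ((rs.foldl (fun nw r => if P r then nw.set r ((nw.getD r []).set c "_") else nw) nw).getD r' []).length
      = (nw.getD r' []).length := by
  rw [(pv_inner P c rs nw).2 r']; split <;> simp

theorem pv_outer (P : Nat → Nat → Prop) [inst : ∀ r c, Decidable (P r c)] (row : Nat)
    (cs : List Nat) (nw : List (List String)) :
    ((cs.foldl (fun nw c => (List.range row).foldl
        (fun nw r => if P r c then nw.set r ((nw.getD r []).set c "_") else nw) nw) nw).length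
      = nw.length) ∧
    (∀ r', ((cs.foldl (fun nw c => (List.range row).foldl
        (fun nw r => if P r c then nw.set r ((nw.getD r []).set c "_") else nw) nw) nw).getD r' []).length
      = (nw.getD r' []).length) ∧
    (∀ r' c', ((cs.foldl (fun nw c => (List.range row).foldl
        (fun nw r => if P r c then nw.set r ((nw.getD r []).set c "_") else nw) nw) nw).getD r' []).getD c' ""
      = if c' ∈ cs ∧ r' < row ∧ P r' c' ∧ r' < nw.length ∧ c' < (nw.getD r' []).length then "_"
        else (nw.getD r' []).getD c' "") := by
  induction cs generalizing nw with
  | nil => simp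
  | cons c cst ih =>
    simp only [List.foldl_cons]
    obtain ⟨ihl, ihrl, ihe⟩ := ih ((List.range row).foldl
        (fun nw r => if P r c then nw.set r ((nw.getD r []).set c "_") else nw) nw)
    have hlen := (pv_inner (fun r => P r c) c (List.range row) nw).1
    have hrl := pv_inner_rowlen (fun r => P r c) c (List.range row) nw
    refine ⟨by rw [ihl, hlen], fun r' => by rw [ihrl r', hrl r'], ?_⟩
    intro r' c'
    rw [ihe r' c', hlen, hrl r']
    rw [pv_inner_entry]
    simp only [List.mem_range, List.mem_cons]
    by_cases hA : c' ∈ cst ∧ r' < row ∧ P r' c' ∧ r' < nw.length ∧ c' < (nw.getD r' []).length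
    · rw [if_pos hA, if_pos (by tauto)]
    · rw [if_neg hA]
      by_cases hB : r' < row ∧ P r' c ∧ r' < nw.length ∧ c = c' ∧ c < (nw.getD r' []).length
      · obtain ⟨a, b, d, e, f⟩ := hB
        subst e
        rw [if_pos ⟨a, b, d, rfl, f⟩, if_pos ⟨Or.inl rfl, a, b, d, f⟩]
      · rw [if_neg hB, if_neg ?_]
        rintro ⟨(he | hm), hk⟩
        · subst he
          exact hB ⟨hk.1, hk.2.1, hk.2.2.1, rfl, hk.2.2.2⟩
        · exact hA ⟨hm, hk⟩


theorem pv_headD_eq_getD {α : Type} (l : List α) (d : α) : l.headD d = l.getD 0 d := by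
  cases l <;> rfl

theorem pv_join_nil_flatten (l : List (List Char)) : PySem.Chars.join [] l = l.flatten := by
  show [].intercalate l = l.flatten
  induction l with
  | nil => rfl
  | cons x t ih =>
    cases t with
    | nil => simp [List.intercalate]
    | cons y u =>
      rw [show ([] : List Char).intercalate (x :: y :: u) = x ++ [].intercalate (y :: u) by
        simp [List.intercalate], ih]
      simp

theorem pv_double_fold_ite {β : Type} (p : Nat → Nat → Prop) [inst : ∀ r c, Decidable (p r c)]
    (g : Nat → Nat → List β) (n m : Nat) :
    (List.range n).foldl (fun acc r => (List.range m).foldl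
        (fun acc c => if p r c then acc ++ g r c else acc) acc) []
      = (List.range n).flatMap (fun r => (List.range m).flatMap
          (fun c => if p r c then g r c else [])) := by
  have h : ∀ (r : Nat) (acc : List β) (c : Nat),
      (if p r c then acc ++ g r c else acc) = acc ++ (if p r c then g r c else []) := by
    intro r acc c; split <;> simp
  simp only [h]
  simp [List.flatMap_def]

def pvCell (grid : List (List String)) (r c : Nat) : String := (grid.getD r []).getD c ""
def pvRowCnt (grid : List (List String)) (r c : Nat) : Nat :=
  (grid.getD r []).count (pvCell grid r c)
def pvColList (grid : List (List String)) (c : Nat) : List String :=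
  (List.range grid.length).map (fun r' => (grid.getD r' []).getD c "")
def pvColCnt (grid : List (List String)) (r c : Nat) : Nat :=
  (pvColList grid c).count (pvCell grid r c)
def pvBlank1 (grid : List (List String)) (r c : Nat) : String :=
  if (grid.getD r []).count ((grid.getD r []).getD c "") > 1 then "_"
  else (grid.getD r []).getD c ""


-- ===== VERDICT (by name: the statement is the Claim_ definition above) =====
theorem pv_newWord (grid : List (List String)) :
    (List.range grid.length).foldl (fun nw rowidx =>
      nw ++ [(List.range (grid.headD []).length).foldl (fun temp colidx =>
        if (grid.getD rowidx []).count ((grid.getD rowidx []).getD colidx "") > 1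
        then temp ++ ["_"]
        else temp ++ [(grid.getD rowidx []).getD colidx ""]) []]) []
    = (List.range grid.length).map (fun r =>
        (List.range (grid.headD []).length).map (fun c => pvBlank1 grid r c)) := by
  have h : ∀ (r : Nat) (temp : List String) (c : Nat),
      (if (grid.getD r []).count ((grid.getD r []).getD c "") > 1
       then temp ++ ["_"] else temp ++ [(grid.getD r []).getD c ""])
        = temp ++ [pvBlank1 grid r c] := by
    intro r temp c; unfold pvBlank1; split <;> rfl
  simp only [h, PySem.List.foldl_append_singleton_eq_map, List.nil_append]


theorem pv_cell_mem_row (grid : List (List String))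
    (hlen : ∀ l ∈ grid, (grid.headD []).length ≤ l.length) (r c : Nat)
    (hr : r < grid.length) (hc : c < (grid.headD []).length) :
    pvCell grid r c ∈ grid.getD r [] := by
  have hmem : grid.getD r [] ∈ grid := by
    rw [List.getD_eq_getElem grid [] hr]; exact List.getElem_mem hr
  have hclen : c < (grid.getD r []).length := lt_of_lt_of_le hc (hlen _ hmem)
  unfold pvCell
  rw [List.getD_eq_getElem _ "" hclen]
  exact List.getElem_mem hclen

theorem pv_rowcnt_pos (grid : List (List String))
    (hlen : ∀ l ∈ grid, (grid.headD []).length ≤ l.length) (r c : Nat)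
    (hr : r < grid.length) (hc : c < (grid.headD []).length) :
    0 < pvRowCnt grid r c := by
  unfold pvRowCnt
  exact List.count_pos_iff.mpr (pv_cell_mem_row grid hlen r c hr hc)

theorem pv_colcnt_pos (grid : List (List String)) (r c : Nat) (hr : r < grid.length) :
    0 < pvColCnt grid r c := by
  unfold pvColCnt
  refine List.count_pos_iff.mpr ?_
  unfold pvColList
  exact List.mem_map.mpr ⟨r, List.mem_range.mpr hr, rfl⟩


def pvNW (grid : List (List String)) : List (List String) :=
  (List.range grid.length).map (fun r =>
    (List.range (grid.headD []).length).map (fun c => pvBlank1 grid r c))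

def pvNW2 (grid : List (List String)) : List (List String) :=
  (List.range (grid.headD []).length).foldl (fun nw c =>
    (List.range grid.length).foldl (fun nw r =>
      if ((List.range grid.length).foldl (fun d rowidx =>
            PySem.Dict.modify d ((grid.getD rowidx []).getD c "") 0 (· + 1))
            (PySem.Dict.empty : PySem.Dict String Int)).getD ((grid.getD r []).getD c "") 0 > 1
      then nw.set r ((nw.getD r []).set c "_") else nw) nw) (pvNW grid)

theorem pv_NW_len (grid : List (List String)) : (pvNW grid).length = grid.length := by
  simp [pvNW]

theorem pv_NW_row (grid : List (List String)) (r : Nat) (hr : r < grid.length) :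
    (pvNW grid).getD r [] = (List.range (grid.headD []).length).map (fun c => pvBlank1 grid r c) := by
  unfold pvNW; rw [PySem.List.getD_map_range _ _ _ _ hr]

theorem pv_NW_entry (grid : List (List String)) (r c : Nat) (hr : r < grid.length)
    (hc : c < (grid.headD []).length) :
    ((pvNW grid).getD r []).getD c "" = pvBlank1 grid r c := by
  rw [pv_NW_row grid r hr, PySem.List.getD_map_range _ _ _ _ hc]

theorem pv_NW2_len (grid : List (List String)) : (pvNW2 grid).length = grid.length := by
  unfold pvNW2
  rw [(pv_outer (fun r c => ((List.range grid.length).foldl (fun d rowidx =>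
        PySem.Dict.modify d ((grid.getD rowidx []).getD c "") 0 (· + 1))
        (PySem.Dict.empty : PySem.Dict String Int)).getD ((grid.getD r []).getD c "") 0 > 1) grid.length (List.range (grid.headD []).length) (pvNW grid)).1, pv_NW_len]

theorem pv_NW2_collen (grid : List (List String)) (h0 : 0 < grid.length) :
    ((pvNW2 grid).getD 0 []).length = (grid.headD []).length := by
  unfold pvNW2
  rw [(pv_outer (fun r c => ((List.range grid.length).foldl (fun d rowidx =>
        PySem.Dict.modify d ((grid.getD rowidx []).getD c "") 0 (· + 1))
        (PySem.Dict.empty : PySem.Dict String Int)).getD ((grid.getD r []).getD c "") 0 > 1) grid.length (List.range (grid.headD []).length) (pvNW grid)).2.1 0,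
    pv_NW_row grid 0 h0]
  simp

theorem pv_NW2_entry (grid : List (List String)) (r c : Nat) (hr : r < grid.length)
    (hc : c < (grid.headD []).length) :
    ((pvNW2 grid).getD r []).getD c "" =
      if pvColCnt grid r c > 1 then "_" else pvBlank1 grid r c := by
  unfold pvNW2
  rw [(pv_outer (fun r c => ((List.range grid.length).foldl (fun d rowidx =>
        PySem.Dict.modify d ((grid.getD rowidx []).getD c "") 0 (· + 1))
        (PySem.Dict.empty : PySem.Dict String Int)).getD ((grid.getD r []).getD c "") 0 > 1) grid.length (List.range (grid.headD []).length) (pvNW grid)).2.2 r c]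
  have hPd : ((List.range grid.length).foldl (fun d rowidx =>
        PySem.Dict.modify d ((grid.getD rowidx []).getD c "") 0 (· + 1))
        (PySem.Dict.empty : PySem.Dict String Int)).getD ((grid.getD r []).getD c "") 0 = (pvColCnt grid r c : Int) := by
    rw [show (List.range grid.length).foldl (fun d rowidx =>
          PySem.Dict.modify d ((grid.getD rowidx []).getD c "") 0 (· + 1)) (PySem.Dict.empty : PySem.Dict String Int)
        = ((List.range grid.length).map (fun r' => (grid.getD r' []).getD c "")).foldl
            (fun d x => PySem.Dict.modify d x 0 (· + 1)) (PySem.Dict.empty : PySem.Dict String Int) from by rw [List.foldl_map]]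
    rw [PySem.Dict.getD_foldl_modify_add_one]
    simp [pvColCnt, pvColList, pvCell]
  rw [hPd]
  have hb1 : r < (pvNW grid).length := by rw [pv_NW_len]; exact hr
  have hb2 : c < ((pvNW grid).getD r []).length := by rw [pv_NW_row grid r hr]; simpa using hc
  rw [pv_NW_entry grid r c hr hc]
  by_cases hgt : pvColCnt grid r c > 1
  · rw [if_pos ⟨List.mem_range.mpr hc, hr, by exact_mod_cast hgt, hb1, hb2⟩, if_pos hgt]
  · rw [if_neg (fun h => hgt (by exact_mod_cast h.2.2.1)), if_neg hgt]

theorem pv_pointwise (grid : List (List String)) (r c : Nat)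
    (_hr : r < grid.length) (_hc : c < (grid.headD []).length)
    (hrpos : 0 < pvRowCnt grid r c) (hcpos : 0 < pvColCnt grid r c)
    (hD : ¬ (pvCell grid r c = "_" ∧ (grid.getD r []).count "_" = 1 ∧
        (pvColList grid c).count "_" = 1)) :
    (if (if pvColCnt grid r c > 1 then "_" else pvBlank1 grid r c) ≠ "_"
     then (if pvColCnt grid r c > 1 then "_" else pvBlank1 grid r c).toList else [])
    = (if ((pvRowCnt grid r c : Int) == 1 && ((pvColCnt grid r c : Int) == 1)) = true
       then [pvCell grid r c] else []).flatMap String.toList := by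
  have hblank : pvBlank1 grid r c = if pvRowCnt grid r c > 1 then "_" else pvCell grid r c := rfl
  by_cases hcell : pvCell grid r c = "_"
  · have hb : pvBlank1 grid r c = "_" := by rw [hblank, hcell]; split <;> rfl
    have h1 : ¬(pvRowCnt grid r c = 1 ∧ pvColCnt grid r c = 1) := by
      rintro ⟨a, b⟩
      refine hD ⟨hcell, ?_, ?_⟩
      · unfold pvRowCnt at a; rwa [hcell] at a
      · unfold pvColCnt at b; rwa [hcell] at b
    rw [hb]
    simp only [ite_self, ne_eq, not_true_eq_false, if_false]
    have hcond : ((pvRowCnt grid r c : Int) == 1 && ((pvColCnt grid r c : Int) == 1)) = false := by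
      rw [Bool.eq_false_iff]
      intro hT
      rw [Bool.and_eq_true, beq_iff_eq, beq_iff_eq] at hT
      obtain ⟨hT1, hT2⟩ := hT
      exact h1 ⟨by exact_mod_cast hT1, by exact_mod_cast hT2⟩
    rw [hcond]
    simp
  · by_cases hcgt : pvColCnt grid r c > 1
    · have : pvColCnt grid r c ≠ 1 := by omega
      rw [if_pos hcgt]
      simp [this]
    · have hc1 : pvColCnt grid r c = 1 := by omega
      rw [if_neg hcgt, hblank]
      by_cases hrgt : pvRowCnt grid r c > 1
      · have : pvRowCnt grid r c ≠ 1 := by omega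
        rw [if_pos hrgt]
        simp [this]
      · have hr1 : pvRowCnt grid r c = 1 := by omega
        rw [if_neg hrgt, if_pos hcell]
        have hcondT : ((pvRowCnt grid r c : Int) == 1 && ((pvColCnt grid r c : Int) == 1)) = true := by
          simp [hr1, hc1]
        rw [hcondT]
        simp

theorem encrypted_spec : Claim_unchanged_encrypted := by
  intro grid _dom hpre hD
  obtain ⟨hne, hlen⟩ := hpre
  have hrow0 : 0 < grid.length := List.length_pos_of_ne_nil hne
  have hDp : ∀ r', r' ∈ List.range grid.length → ∀ c', c' ∈ List.range (grid.headD []).length →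
      ¬((grid.getD r' []).getD c' "" = "_" ∧ (grid.getD r' []).count "_" = 1 ∧
        ((List.range grid.length).map (fun r'' => (grid.getD r'' []).getD c' "")).count "_" = 1) := by
    intro r' hr' c' hc' h
    apply hD
    unfold D_encrypted
    exact ⟨r', hr', c', hc', h⟩
  show encrypted grid = encrypted_alt grid
  unfold encrypted encrypted_alt
  simp only []
  refine congrArg String.mk ?_
  rw [pv_newWord grid]
  rw [show (List.range (grid.headD []).length).foldl (fun nw colidx =>
        (List.range grid.length).foldl (fun nw rowidx =>
          if ((List.range grid.length).foldl (fun d rowidx =>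
                PySem.Dict.modify d ((grid.getD rowidx []).getD colidx "") 0 (· + 1))
                (PySem.Dict.empty : PySem.Dict String Int)).getD
                ((grid.getD rowidx []).getD colidx "") 0 > 1
          then nw.set rowidx ((nw.getD rowidx []).set colidx "_") else nw) nw)
        ((List.range grid.length).map (fun r =>
          (List.range (grid.headD []).length).map (fun c => pvBlank1 grid r c)))
      = pvNW2 grid from rfl]
  rw [pv_NW2_len, pv_headD_eq_getD (pvNW2 grid) [], pv_NW2_collen grid hrow0]
  rw [pv_double_fold_ite (p := fun r c => ((pvNW2 grid).getD r []).getD c "" ≠ "_")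
    (g := fun r c => (((pvNW2 grid).getD r []).getD c "").toList)]
  rw [pv_join_nil_flatten]
  rw [pv_double_fold_ite (β := String)]
  rw [← List.flatMap_def]
  simp only [List.flatMap_assoc]
  refine List.flatMap_congr fun r hr' => ?_
  refine List.flatMap_congr fun c hc' => ?_
  rw [List.mem_range] at hr' hc'
  rw [pv_NW2_entry grid r c hr' hc']
  rw [PySem.List.getD_map_range _ _ _ _ hc']
  simp only [PySem.Dict.getD_counter]
  exact pv_pointwise grid r c hr' hc'
    (pv_rowcnt_pos grid hlen r c hr' hc') (pv_colcnt_pos grid r c hr')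
    (hDp r (List.mem_range.mpr hr') c (List.mem_range.mpr hc'))

theorem encrypted_changed : Claim_changed_encrypted := by
  unfold Claim_changed_encrypted; decide
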